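-- pv_equiv track=rewrite | github.com/facebookresearch/vissl | vissl/trainer/trainer_main.py | _to_unique_feature_names
-- ===== SOURCE A (Python) =====
-- from typing import Any, Dict, List, Tuple
--
-- def _to_unique_feature_names(feat_names: List[str]) -> List[str]:
--     """
--     We may have multiple head with different average pooling for
--     the same features. In case of export, we want to make sure to
--     export the outputs of these heads with different names.
--
--     This function will rename the features in the following way:
--     ["res4", "res4", "res5"] -> ["res4", "res4_1", "res5"]
--
--     No effect if there are no duplicate feature names.
--     """
--     counter = {}
--     new_feat_names = []
--     for feat_name in feat_names:
--         index = counter.get(feat_name, 0)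
--         if index > 0:
--             new_feat_names.append(f"{feat_name}_{index}")
--         else:
--             new_feat_names.append(feat_name)
--         counter[feat_name] = index + 1
--     return new_feat_names
-- ===== SOURCE B (Python) =====
-- from typing import Any, Dict, List, Tuple
--
-- def _to_unique_feature_names(feat_names: List[str]) -> List[str]:
--     # Group pass: map each name to the ordered list of positions where it occurs.
--     positions = {}
--     for i, name in enumerate(feat_names):
--         positions.setdefault(name, []).append(i)
--     # Scatter pass: write each group's renamed entries back at their original positions.
--     result = [""] * len(feat_names)
--     for name, idxs in positions.items():
--         for j, i in enumerate(idxs):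
--             result[i] = name if j == 0 else f"{name}_{j}"
--     return result
-- ===== Notes on version B (the rewrite author's own statement) =====
-- stated objective: alternative
-- what changed: Replaced A's single stateful pass (counter dict, append in input order) by a two-phase group-and-scatter: first build an index mapping each name to the ordered list of positions where it occurs, then iterate the groups and write name / name_j back into a preallocated result list at the original positions.
import Mathlib
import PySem

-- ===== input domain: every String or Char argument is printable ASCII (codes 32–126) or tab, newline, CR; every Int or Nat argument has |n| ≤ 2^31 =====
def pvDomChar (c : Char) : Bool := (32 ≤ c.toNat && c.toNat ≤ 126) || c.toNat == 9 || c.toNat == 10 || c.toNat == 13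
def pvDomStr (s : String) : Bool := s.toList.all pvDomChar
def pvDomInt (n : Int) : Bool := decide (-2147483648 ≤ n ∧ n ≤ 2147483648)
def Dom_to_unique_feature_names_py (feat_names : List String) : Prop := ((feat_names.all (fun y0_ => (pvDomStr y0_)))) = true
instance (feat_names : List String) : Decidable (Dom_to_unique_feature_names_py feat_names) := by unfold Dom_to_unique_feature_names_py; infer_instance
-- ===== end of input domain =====

-- B replaces A's single stateful counting pass by a two-phase group-and-scatter: group the
-- positions of each name in one pass, then write the renamed entries back at their original
-- positions. Alternative decomposition of the same O(n) task, not faster.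

-- ===== PORT A =====
def to_unique_feature_names_py (feat_names : List String) : List String :=
  (feat_names.foldl
    (fun (st : PySem.Dict String Int × List String) feat_name =>
      let index := st.1.getD feat_name 0
      let new_feat_names :=
        if index > 0 then st.2 ++ [feat_name ++ "_" ++ PySem.Int.toStr index]
        else st.2 ++ [feat_name]
      (st.1.insert feat_name (index + 1), new_feat_names))
    ((PySem.Dict.empty : PySem.Dict String Int), ([] : List String))).2

-- ===== PORT B =====
def to_unique_feature_names_py_alt (feat_names : List String) : List String :=
  -- positions.setdefault(name, []).append(i)  ==  d[name] = d.get(name, []) + [i]  ==  Dict.modify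
  let positions :=
    (PySem.List.enumerate feat_names).foldl
      (fun (d : PySem.Dict String (List Int)) p => d.modify p.2 [] (fun l => l ++ [p.1]))
      PySem.Dict.empty
  let result := List.replicate feat_names.length ""
  positions.items.foldl
    (fun res g =>
      (PySem.List.enumerate g.2).foldl
        (fun res q =>
          PySem.List.pySetD res q.2
            (if q.1 = 0 then g.1 else g.1 ++ "_" ++ PySem.Int.toStr q.1))
        res)
    result

-- ===== PRECONDITION & SPEC =====
def Spec_to_unique_feature_names_py (feat_names : List String) (out : List String) : Prop := out = to_unique_feature_names_py_alt feat_names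
instance (feat_names : List String) (out : List String) : Decidable (Spec_to_unique_feature_names_py feat_names out) := by unfold Spec_to_unique_feature_names_py; infer_instance

-- ===== CLAIM (what is proved, stated in full; the proofs are below) =====
def Claim_equal_to_unique_feature_names_py : Prop := ∀ (feat_names : List String), Dom_to_unique_feature_names_py feat_names → Spec_to_unique_feature_names_py feat_names (to_unique_feature_names_py feat_names)

-- ===== LEMMAS AND PROOFS =====

-- Common reference form: each position gets a suffix equal to the count of its name in the prefix.
def pvRename (xs : List String) : List String :=
  (PySem.List.enumerate xs).map (fun p =>
    let k : Int := ((PySem.List.slice xs none (some p.1)).count p.2 : Int)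
    if k = 0 then p.2 else p.2 ++ "_" ++ PySem.Int.toStr k)

-- The positions (as Ints) at which `name` occurs in `xs`, in order.
def pvOccs (xs : List String) (name : String) : List Int :=
  ((PySem.List.enumerate xs).filter (fun p => p.2 == name)).map (·.1)

-- The value the renaming writes at position i (via getElem? to stay total).
def pvVal (xs : List String) (i : Nat) : String :=
  match xs[i]? with
  | none => ""
  | some n =>
      if (xs.take i).count n = 0 then n
      else n ++ "_" ++ PySem.Int.toStr (((xs.take i).count n : Int))

-- ---- A equals pvRename ----

lemma rename_snoc (xs : List String) (n : String) :
    pvRename (xs ++ [n]) =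
      pvRename xs ++
        [if (xs.count n : Int) = 0 then n else n ++ "_" ++ PySem.Int.toStr (xs.count n)] := by
  unfold pvRename
  rw [PySem.List.enumerate_append, List.map_append]
  congr 1
  · refine List.map_congr_left (fun p hp => ?_)
    rcases (PySem.List.mem_enumerate_iff _ _ _).1 hp with ⟨k, hk, rfl⟩
    simp only [zero_add]
    rw [show ((k : Int)) = ((k : Nat) : Int) from rfl,
        PySem.List.slice_to_natCast, PySem.List.slice_to_natCast,
        List.take_append_of_le_length (Nat.le_of_lt hk)]
  · simp only [PySem.List.enumerate, List.map]
    rw [show ((0 : Int) + (xs.length : Int)) = ((xs.length : Nat) : Int) by omega,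
        PySem.List.slice_to_natCast, List.take_left]

-- Invariant of A's fold: the counter holds prefix counts, the accumulator is pvRename of the prefix.
lemma a_invariant (xs : List String) :
    (∀ s : String,
        (xs.foldl
          (fun (st : PySem.Dict String Int × List String) feat_name =>
            let index := st.1.getD feat_name 0
            let new_feat_names :=
              if index > 0 then st.2 ++ [feat_name ++ "_" ++ PySem.Int.toStr index]
              else st.2 ++ [feat_name]
            (st.1.insert feat_name (index + 1), new_feat_names))
          ((PySem.Dict.empty : PySem.Dict String Int), ([] : List String))).1.getD s 0
          = (xs.count s : Int)) ∧
    (xs.foldl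
          (fun (st : PySem.Dict String Int × List String) feat_name =>
            let index := st.1.getD feat_name 0
            let new_feat_names :=
              if index > 0 then st.2 ++ [feat_name ++ "_" ++ PySem.Int.toStr index]
              else st.2 ++ [feat_name]
            (st.1.insert feat_name (index + 1), new_feat_names))
          ((PySem.Dict.empty : PySem.Dict String Int), ([] : List String))).2
      = pvRename xs := by
  induction xs using List.reverseRecOn with
  | nil => constructor
           · intro s; simp [PySem.Dict.getD, PySem.Dict.get?, PySem.Dict.empty]
           · rfl
  | append_singleton xs n ih =>
    obtain ⟨hd, ho⟩ := ih
    rw [List.foldl_append]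
    constructor
    · intro s
      simp only [List.foldl]
      rw [PySem.Dict.getD_insert]
      by_cases h : s = n
      · subst h
        rw [if_pos rfl, hd s, List.count_append]
        simp
      · rw [if_neg h, hd s, List.count_append]
        have : List.count s [n] = 0 := by
          simp [List.count_singleton]
          exact fun hc => absurd hc.symm h
        omega
    · simp only [List.foldl]
      rw [rename_snoc, ← ho, hd n]
      by_cases h : (xs.count n : Int) = 0
      · rw [if_neg (by omega), if_pos h]
      · rw [if_pos (by omega), if_neg h]

lemma a_eq_rename (xs : List String) : to_unique_feature_names_py xs = pvRename xs := by
  unfold to_unique_feature_names_py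
  exact (a_invariant xs).2

-- ---- facts about pvOccs ----

lemma pvOccs_snoc (xs : List String) (x name : String) :
    pvOccs (xs ++ [x]) name =
      pvOccs xs name ++ (if x = name then [(xs.length : Int)] else []) := by
  unfold pvOccs
  rw [PySem.List.enumerate_append, List.filter_append, List.map_append]
  congr 1
  simp only [PySem.List.enumerate, List.filter, zero_add]
  by_cases h : x = name
  · simp [h]
  · rw [show (x == name) = false by simpa using h]
    simp [h]

lemma pvOccs_mem (xs : List String) (name : String) :
    ∀ a ∈ pvOccs xs name, 0 ≤ a ∧ a.toNat < xs.length ∧ xs[a.toNat]? = some name := by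
  intro a ha
  unfold pvOccs at ha
  rcases List.mem_map.1 ha with ⟨p, hp, rfl⟩
  rcases List.mem_filter.1 hp with ⟨hpe, hpf⟩
  rcases (PySem.List.mem_enumerate_iff _ _ _).1 hpe with ⟨k, hk, rfl⟩
  simp only [zero_add] at hpf ⊢
  have hxk : xs[k] = name := by simpa using hpf
  refine ⟨by positivity, by simpa using hk, by simp [hxk, List.getElem?_eq_getElem hk]⟩

lemma pvOccs_length (xs : List String) (name : String) :
    (pvOccs xs name).length = xs.count name := by
  induction xs using List.reverseRecOn with
  | nil => rfl
  | append_singleton xs x ih =>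
    rw [pvOccs_snoc, List.length_append, List.count_append, ih]
    by_cases h : x = name <;> simp [h]

lemma pvOccs_nodup (xs : List String) (name : String) : (pvOccs xs name).Nodup := by
  induction xs using List.reverseRecOn with
  | nil => exact List.nodup_nil
  | append_singleton xs x ih =>
    rw [pvOccs_snoc]
    by_cases h : x = name
    · rw [if_pos h]
      refine List.Nodup.append ih (List.nodup_singleton _) ?_
      intro a ha hb
      rcases pvOccs_mem xs name a ha with ⟨h0, hlt, _⟩
      simp only [List.mem_singleton] at hb
      subst hb
      omega
    · simpa [h] using ih

lemma pvOccs_rank (xs : List String) (name : String) (i : Nat) (hi : i < xs.length)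
    (hxi : xs[i] = name) :
    (((xs.take i).count name : Int), (i : Int)) ∈
      PySem.List.enumerate (pvOccs xs name) 0 := by
  induction xs using List.reverseRecOn with
  | nil => simp at hi
  | append_singleton xs x ih =>
    rw [pvOccs_snoc, PySem.List.enumerate_append]
    rcases Nat.lt_or_ge i xs.length with hlt | hge
    · have hxi' : xs[i] = name := by
        have := hxi
        rwa [List.getElem_append_left hlt] at this
      have htake : (xs ++ [x]).take i = xs.take i := by
        exact List.take_append_of_le_length (Nat.le_of_lt hlt)
      rw [htake]
      exact List.mem_append_left _ (ih hlt hxi')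
    · have hieq : i = xs.length := by
        have := hi
        simp only [List.length_append, List.length_singleton] at this
        omega
      subst hieq
      have hx : x = name := by simpa using hxi
      have htake : (xs ++ [x]).take xs.length = xs := List.take_left
      rw [htake, hx, if_pos rfl]
      refine List.mem_append_right _ ?_
      have hlen : ((pvOccs xs name).length : Int) = (xs.count name : Int) := by
        exact_mod_cast congrArg Nat.cast (pvOccs_length xs name)
      simp [PySem.List.enumerate, pvOccs_length xs name]

-- ---- the scatter-write fold ----

-- Length is preserved by a fold of writes.
lemma writefold_length (L : List (Int × Int)) (f : Int × Int → String) :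
    ∀ res : List String,
      (L.foldl (fun r q => PySem.List.pySetD r q.2 (f q)) res).length = res.length := by
  induction L with
  | nil => intro res; rfl
  | cons q L ih =>
    intro res
    rw [List.foldl_cons, ih]
    exact PySem.List.length_pySetD _ _ _

-- A position not written to keeps its old value.
lemma writefold_not_mem (L : List (Int × Int)) (f : Int × Int → String)
    (hpos : ∀ q ∈ L, 0 ≤ q.2) (i : Nat) (hni : (i : Int) ∉ L.map (·.2)) :
    ∀ res : List String,
      (L.foldl (fun r q => PySem.List.pySetD r q.2 (f q)) res)[i]? = res[i]? := by
  induction L with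
  | nil => intro res; rfl
  | cons q L ih =>
    intro res
    rw [List.foldl_cons]
    have hq : 0 ≤ q.2 := hpos q (List.mem_cons_self)
    have hni' : (i : Int) ∉ L.map (·.2) := fun h => hni (List.mem_cons_of_mem _ h)
    rw [ih (fun p hp => hpos p (List.mem_cons_of_mem _ hp)) hni',
        PySem.List.pySetD_of_nonneg _ _ hq]
    refine List.getElem?_set_ne ?_
    intro h
    apply hni
    have : (i : Int) = q.2 := by
      rw [← h, Int.toNat_of_nonneg hq]
    exact this ▸ List.mem_map.2 ⟨q, List.mem_cons_self, rfl⟩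

-- With distinct in-range targets, each write lands and survives.
lemma writefold_mem (L : List (Int × Int)) (f : Int × Int → String)
    (hnd : (L.map (·.2)).Nodup) :
    ∀ res : List String,
      (∀ q ∈ L, 0 ≤ q.2 ∧ q.2.toNat < res.length) →
      ∀ q0 ∈ L,
        (L.foldl (fun r q => PySem.List.pySetD r q.2 (f q)) res)[q0.2.toNat]? = some (f q0) := by
  induction L with
  | nil => intro res _ q0 h; simp at h
  | cons q L ih =>
    intro res hrange q0 hq0
    have hq : 0 ≤ q.2 ∧ q.2.toNat < res.length := hrange q (List.mem_cons_self)
    rw [List.foldl_cons, PySem.List.pySetD_of_nonneg _ _ hq.1]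
    have hlen : (res.set q.2.toNat (f q)).length = res.length := by simp
    rcases List.mem_cons.1 hq0 with rfl | hmem
    · -- the head write: no later write targets the same position
      have hni : (q0.2 : Int) ∉ L.map (·.2) := by
        have := hnd
        simp only [List.map_cons, List.nodup_cons] at this
        exact this.1
      have hni' : ((q0.2.toNat : Nat) : Int) ∉ L.map (·.2) := by
        rwa [Int.toNat_of_nonneg hq.1]
      rw [writefold_not_mem L f (fun p hp => (hrange p (List.mem_cons_of_mem _ hp)).1)
            q0.2.toNat hni' _]
      exact List.getElem?_set_self (by omega)
    · exact ih (by simpa using hnd.of_cons) _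
        (fun p hp => by
          have := hrange p (List.mem_cons_of_mem _ hp)
          exact ⟨this.1, by omega⟩)
        q0 hmem

-- One group's scatter writes exactly the renamed entries of that name.
lemma group_step (xs : List String) (name : String) (res : List String)
    (hlen : res.length = xs.length) (i : Nat) (hi : i < xs.length) :
    ((PySem.List.enumerate (pvOccs xs name)).foldl
        (fun r q => PySem.List.pySetD r q.2
          (if q.1 = 0 then name else name ++ "_" ++ PySem.Int.toStr q.1)) res)[i]? =
      if xs[i] = name then some (pvVal xs i) else res[i]? := by
  set L := PySem.List.enumerate (pvOccs xs name) 0 with hL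
  have hmapL : L.map (·.2) = pvOccs xs name := PySem.List.map_snd_enumerate _ _
  have hrange : ∀ q ∈ L, 0 ≤ q.2 ∧ q.2.toNat < res.length := by
    intro q hq
    have : q.2 ∈ pvOccs xs name := hmapL ▸ List.mem_map.2 ⟨q, hq, rfl⟩
    rcases pvOccs_mem xs name q.2 this with ⟨h0, hlt, _⟩
    exact ⟨h0, by omega⟩
  by_cases h : xs[i] = name
  · rw [if_pos h]
    have hq0 : (((xs.take i).count name : Int), (i : Int)) ∈ L :=
      pvOccs_rank xs name i hi h
    have := writefold_mem L
        (fun q => if q.1 = 0 then name else name ++ "_" ++ PySem.Int.toStr q.1)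
        (hmapL ▸ pvOccs_nodup xs name) res hrange _ hq0
    simp only [Int.toNat_natCast] at this
    rw [this]
    congr 1
    unfold pvVal
    rw [List.getElem?_eq_getElem hi, h]
    by_cases hc : (xs.take i).count name = 0
    · simp [hc]
    · simp [hc]
  · rw [if_neg h]
    refine writefold_not_mem L _ (fun q hq => (hrange q hq).1) i ?_ res
    rw [hmapL]
    intro hmem
    rcases pvOccs_mem xs name _ hmem with ⟨_, _, hget⟩
    simp only [Int.toNat_natCast] at hget
    rw [List.getElem?_eq_getElem hi] at hget
    exact h (Option.some.inj hget)

-- Folding the groups of a list of names: positions of processed names hold their renamed value.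
lemma keys_fold (xs : List String) (N : List String) :
    ∀ res : List String, res.length = xs.length →
      (N.foldl
        (fun res name =>
          (PySem.List.enumerate (pvOccs xs name)).foldl
            (fun r q => PySem.List.pySetD r q.2
              (if q.1 = 0 then name else name ++ "_" ++ PySem.Int.toStr q.1)) res)
        res).length = xs.length ∧
      ∀ i : Nat, (hi : i < xs.length) →
        (N.foldl
          (fun res name =>
            (PySem.List.enumerate (pvOccs xs name)).foldl
              (fun r q => PySem.List.pySetD r q.2
                (if q.1 = 0 then name else name ++ "_" ++ PySem.Int.toStr q.1)) res)
          res)[i]? = if xs[i] ∈ N then some (pvVal xs i) else res[i]? := by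
  induction N with
  | nil =>
    intro res hlen
    exact ⟨hlen, fun i hi => by simp⟩
  | cons name N ih =>
    intro res hlen
    have hlen' :
        ((PySem.List.enumerate (pvOccs xs name)).foldl
          (fun r q => PySem.List.pySetD r q.2
            (if q.1 = 0 then name else name ++ "_" ++ PySem.Int.toStr q.1)) res).length
          = xs.length := by
      rw [writefold_length _ _ res]; exact hlen
    obtain ⟨ihl, ihg⟩ := ih _ hlen'
    refine ⟨by simpa using ihl, fun i hi => ?_⟩
    rw [List.foldl_cons, ihg i hi, group_step xs name res hlen i hi]
    by_cases hmem : xs[i] ∈ N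
    · simp [hmem]
    · by_cases heq : xs[i] = name
      · simp [heq]
      · simp [hmem, heq]

-- pvRename elementwise.
lemma rename_getElem? (xs : List String) (i : Nat) (hi : i < xs.length) :
    (pvRename xs)[i]? = some (pvVal xs i) := by
  unfold pvRename
  rw [List.getElem?_map, PySem.List.getElem?_enumerate, List.getElem?_eq_getElem hi]
  simp only [Option.map_some, zero_add]
  congr 1
  rw [show ((i : Int)) = ((i : Nat) : Int) from rfl, PySem.List.slice_to_natCast]
  unfold pvVal
  rw [List.getElem?_eq_getElem hi]
  by_cases hc : (xs.take i).count xs[i] = 0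
  · simp [hc]
  · simp [hc]

lemma rename_length (xs : List String) : (pvRename xs).length = xs.length := by
  unfold pvRename
  rw [List.length_map, PySem.List.length_enumerate]

-- ---- B equals pvRename ----

lemma b_eq_rename (xs : List String) : to_unique_feature_names_py_alt xs = pvRename xs := by
  unfold to_unique_feature_names_py_alt
  simp only []
  -- the grouping dict
  set d := (PySem.List.enumerate xs).foldl
      (fun (d : PySem.Dict String (List Int)) p => d.modify p.2 [] (fun l => l ++ [p.1]))
      PySem.Dict.empty with hd
  have hkeys : d.keys = PySem.Set.ofList xs := by
    rw [hd, PySem.Dict.keys_foldl_modify_key (key := fun p : Int × String => p.2)]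
    rw [PySem.Dict.keys_empty, PySem.Set.update_nil_left]
    rw [show (PySem.List.enumerate xs 0).map (fun p : Int × String => p.2)
          = (PySem.List.enumerate xs 0).map (·.2) from rfl,
        PySem.List.map_snd_enumerate]
  have hnodup : d.keys.Nodup := by
    rw [hkeys]; exact PySem.Set.nodup_ofList xs
  have hgetD : ∀ name : String, d.getD name [] = pvOccs xs name := by
    intro name
    rw [hd, show (PySem.List.enumerate xs 0)
          = ((PySem.List.enumerate xs 0).map Prod.swap).map Prod.swap by
            simp [List.map_map, Function.comp_def],
        List.foldl_map]
    simp only [Prod.fst_swap, Prod.snd_swap]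
    rw [PySem.Dict.getD_foldl_modify_append, PySem.Dict.getD_empty]
    unfold pvOccs
    rw [List.filter_map, List.map_map]
    congr 1
  have hitems : d.items = (PySem.Set.ofList xs).map (fun k => (k, pvOccs xs k)) := by
    rw [PySem.Dict.items_eq_map_keys d hnodup []]
    rw [hkeys]
    exact List.map_congr_left (fun k _ => by rw [hgetD k])
  rw [hitems, List.foldl_map]
  have hfold : (fun (x : List String) (y : String) =>
      (PySem.List.enumerate (y, pvOccs xs y).2).foldl
        (fun res q => PySem.List.pySetD res q.2
          (if q.1 = 0 then (y, pvOccs xs y).1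
           else (y, pvOccs xs y).1 ++ "_" ++ PySem.Int.toStr q.1)) x)
      = (fun (res : List String) (name : String) =>
          (PySem.List.enumerate (pvOccs xs name)).foldl
            (fun r q => PySem.List.pySetD r q.2
              (if q.1 = 0 then name else name ++ "_" ++ PySem.Int.toStr q.1)) res) := rfl
  rw [hfold]
  have hbase : (List.replicate xs.length "").length = xs.length := by simp
  obtain ⟨hl, hg⟩ := keys_fold xs (PySem.Set.ofList xs) (List.replicate xs.length "") hbase
  refine List.ext_getElem? (fun i => ?_)
  rcases Nat.lt_or_ge i xs.length with hi | hi
  · rw [hg i hi, rename_getElem? xs i hi,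
        if_pos ((PySem.Set.mem_ofList _ _).2 (List.getElem_mem hi))]
  · rw [List.getElem?_eq_none (by omega), List.getElem?_eq_none (by rw [rename_length]; omega)]

-- ===== VERDICT (by name: the statement is the Claim_ definition above) =====
theorem to_unique_feature_names_py_spec : Claim_equal_to_unique_feature_names_py := by
  intro feat_names _
  unfold Spec_to_unique_feature_names_py
  rw [a_eq_rename, b_eq_rename]
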